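-- pv_equiv track=rewrite | github.com/efforting-tech/python-framework-code | lib/table_processing/table.py | iter_columns_from_line
-- ===== SOURCE A (Python) =====
-- def iter_columns_from_line(line, min_spacing):
-- 	last_column = None
-- 	pending = True
-- 	spaces = 0
--
-- 	for i, c in enumerate(line):
-- 		if pending and c != ' ':
-- 			if last_column is None or spaces >= min_spacing:
-- 				yield i
--
-- 			last_column = i
-- 			pending = False
-- 			spaces = 0
-- 		elif c == ' ':
-- 			spaces += 1
-- 			pending = True
-- ===== SOURCE B (Python) =====
-- def iter_columns_from_line(line, min_spacing):
-- 	n = len(line)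
-- 	starts = [i for i in range(n) if line[i] != ' ' and (i == 0 or line[i - 1] == ' ')]
-- 	ends = [i for i in range(1, n + 1) if line[i - 1] != ' ' and (i == n or line[i] == ' ')]
-- 	if starts:
-- 		yield starts[0]
-- 		for e, s in zip(ends, starts[1:]):
-- 			if s - e >= min_spacing:
-- 				yield s
-- ===== Notes on version B (the rewrite author's own statement) =====
-- stated objective: alternative
-- what changed: B computes all word-start and word-end indices in two independent neighbour-comparison comprehensions over index ranges, then pairs each start with the previous word's end via zip and filters by min_spacing, replacing A's single-pass state machine with pending/spaces/last_column flags.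
import Mathlib
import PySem

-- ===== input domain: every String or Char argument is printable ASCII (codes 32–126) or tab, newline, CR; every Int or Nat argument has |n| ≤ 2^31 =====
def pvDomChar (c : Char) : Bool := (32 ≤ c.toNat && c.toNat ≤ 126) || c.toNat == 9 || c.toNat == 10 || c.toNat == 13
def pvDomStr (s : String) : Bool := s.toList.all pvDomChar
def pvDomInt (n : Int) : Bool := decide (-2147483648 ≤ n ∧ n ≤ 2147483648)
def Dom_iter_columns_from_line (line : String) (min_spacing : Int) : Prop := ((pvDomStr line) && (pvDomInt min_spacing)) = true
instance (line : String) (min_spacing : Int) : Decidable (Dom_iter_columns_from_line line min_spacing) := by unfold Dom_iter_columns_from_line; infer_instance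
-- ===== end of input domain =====

-- B replaces A's per-character pending/spaces state machine with staged passes: two
-- neighbour-comparison comprehensions collecting word starts and word ends, then a
-- zip-and-filter pairing each start with the previous end (alternative, same cost).


-- ===== PORT A =====
-- A's for-loop over enumerate(line) with state (last_column, pending, spaces), yields collected in order.
def aLoop (min_spacing : Int) : List Char → Int → Option Int → Bool → Int → List Int
  | [], _, _, _, _ => []
  | c :: cs, i, lc, pending, spaces =>
    if pending = true ∧ c ≠ ' ' then
      (if lc = none ∨ spaces ≥ min_spacing then [i] else [])
        ++ aLoop min_spacing cs (i + 1) (some i) false 0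
    else if c = ' ' then
      aLoop min_spacing cs (i + 1) lc true (spaces + 1)
    else
      aLoop min_spacing cs (i + 1) lc pending spaces

def iter_columns_from_line (line : String) (min_spacing : Int) : List Int :=
  aLoop min_spacing line.toList 0 none true 0

-- ===== PORT B =====
-- Source B's comprehension 'starts': i in range(n) with line[i] != ' ' and (i == 0 or line[i-1] == ' ').
-- range indices are in bounds, so List.getD is exact for line[i] / line[i-1].
def bStarts (l : List Char) : List Int :=
  ((List.range l.length).filter
    (fun i => decide (l.getD i ' ' ≠ ' ' ∧ (i = 0 ∨ l.getD (i - 1) ' ' = ' ')))).map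
    (fun i : Nat => (i : Int))

-- Source B's comprehension 'ends': i in range(1, n+1) with line[i-1] != ' ' and (i == n or line[i] == ' ').
def bEnds (l : List Char) : List Int :=
  ((List.range' 1 l.length).filter
    (fun i => decide (l.getD (i - 1) ' ' ≠ ' ' ∧ (i = l.length ∨ l.getD i ' ' = ' ')))).map
    (fun i : Nat => (i : Int))

-- Source B's final pairing: first start unconditionally, then zip(ends, starts[1:]) filtered by the gap.
def iter_columns_from_line_alt (line : String) (min_spacing : Int) : List Int :=
  match bStarts line.toList with
  | [] => []
  | s0 :: rest =>
    s0 :: (((bEnds line.toList).zip rest).filter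
      (fun p => decide (p.2 - p.1 ≥ min_spacing))).map (fun p => p.2)

-- ===== PRECONDITION & SPEC =====
def Spec_iter_columns_from_line (line : String) (min_spacing : Int) (out : List Int) : Prop := out = iter_columns_from_line_alt line min_spacing
instance (line : String) (min_spacing : Int) (out : List Int) : Decidable (Spec_iter_columns_from_line line min_spacing out) := by unfold Spec_iter_columns_from_line; infer_instance

-- ===== CLAIM (what is proved, stated in full; the proofs are below) =====
def Claim_equal_iter_columns_from_line : Prop := ∀ (line : String) (min_spacing : Int), Dom_iter_columns_from_line line min_spacing → Spec_iter_columns_from_line line min_spacing (iter_columns_from_line line min_spacing)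

-- ===== LEMMAS AND PROOFS =====

-- Relative-index recursive characterisations of B's two comprehensions.
def sRecN : List Char → Bool → List Nat
  | [], _ => []
  | c :: cs, b => (if c ≠ ' ' ∧ b = true then [0] else []) ++ (sRecN cs (c == ' ')).map (· + 1)

def eRecN : List Char → List Nat
  | [] => []
  | c :: cs =>
    (if c ≠ ' ' ∧ (cs = [] ∨ cs.headD ' ' = ' ') then [1] else []) ++ (eRecN cs).map (· + 1)

-- Absolute Int-index versions used in the loop correspondence.
def sI (l : List Char) (i : Int) (b : Bool) : List Int := (sRecN l b).map (fun k : Nat => i + (k : Int))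
def eI (l : List Char) (i : Int) : List Int := (eRecN l).map (fun k : Nat => i + (k : Int))

-- The zip-filter pairing of B.
def zf (m : Int) (ends starts : List Int) : List Int :=
  ((ends.zip starts).filter (fun p => decide (p.2 - p.1 ≥ m))).map (fun p => p.2)

def combine (m : Int) (starts ends : List Int) : List Int :=
  match starts with
  | [] => []
  | s0 :: rest => s0 :: zf m ends rest

theorem pvMapShift (j : Int) (xs : List Nat) :
    List.map (fun k : Nat => j + (k : Int)) (xs.map (· + 1))
      = List.map (fun k : Nat => (j + 1) + (k : Int)) xs := by
  rw [List.map_map]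
  apply List.map_congr_left
  intro k _
  simp only [Function.comp]
  push_cast
  ring

theorem sI_cons (c : Char) (cs : List Char) (i : Int) (b : Bool) :
    sI (c :: cs) i b = (if c ≠ ' ' ∧ b = true then [i] else []) ++ sI cs (i + 1) (c == ' ') := by
  have h : sRecN (c :: cs) b
      = (if c ≠ ' ' ∧ b = true then [0] else []) ++ (sRecN cs (c == ' ')).map (· + 1) := rfl
  rw [sI, h, List.map_append, pvMapShift]
  congr 1
  split <;> simp

theorem eI_cons (c : Char) (cs : List Char) (i : Int) :
    eI (c :: cs) i = (if c ≠ ' ' ∧ (cs = [] ∨ cs.headD ' ' = ' ') then [i + 1] else [])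
      ++ eI cs (i + 1) := by
  have h : eRecN (c :: cs)
      = (if c ≠ ' ' ∧ (cs = [] ∨ cs.headD ' ' = ' ') then [1] else []) ++ (eRecN cs).map (· + 1) := rfl
  rw [eI, h, List.map_append, pvMapShift]
  congr 1
  split <;> simp

theorem zf_cons (m e s : Int) (E S : List Int) :
    zf m (e :: E) (s :: S) = (if s - e ≥ m then [s] else []) ++ zf m E S := by
  simp only [zf, List.zip_cons_cons, List.filter_cons, decide_eq_true_eq]
  by_cases h : s - e ≥ m
  · simp [h]
  · simp [h]

-- B's 'starts' comprehension equals sRecN (generalized over the initial 'previous is space' flag).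
theorem starts_filter_eq (l : List Char) : ∀ (b : Bool),
    (List.range l.length).filter
      (fun i => decide (l.getD i ' ' ≠ ' ' ∧ (if i = 0 then b = true else l.getD (i - 1) ' ' = ' ')))
      = sRecN l b := by
  induction l with
  | nil => intro b; simp [sRecN]
  | cons c cs ih =>
    intro b
    rw [List.length_cons, List.range_succ_eq_map, List.filter_cons, List.filter_map]
    have htail : ((List.range cs.length).filter
        ((fun i => decide ((c :: cs).getD i ' ' ≠ ' ' ∧
          (if i = 0 then b = true else (c :: cs).getD (i - 1) ' ' = ' '))) ∘ Nat.succ))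
        = (List.range cs.length).filter
          (fun i => decide (cs.getD i ' ' ≠ ' ' ∧
            (if i = 0 then (c == ' ') = true else cs.getD (i - 1) ' ' = ' '))) := by
      apply List.filter_congr
      intro i _
      simp only [Function.comp, decide_eq_decide, List.getD_cons_succ, Nat.succ_ne_zero,
        if_false]
      cases i with
      | zero => simp
      | succ j => simp
    rw [htail, ih (c == ' ')]
    simp only [sRecN, List.getD_cons_zero, reduceIte]
    split_ifs with h1 h2 h2 <;> simp_all

-- B's 'ends' comprehension equals eRecN.
theorem ends_filter_eq (l : List Char) :
    (List.range' 1 l.length).filter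
      (fun i => decide (l.getD (i - 1) ' ' ≠ ' ' ∧ (i = l.length ∨ l.getD i ' ' = ' ')))
      = eRecN l := by
  induction l with
  | nil => simp [eRecN]
  | cons c cs ih =>
    rw [List.length_cons, List.range'_succ, List.filter_cons]
    have hr : List.range' 2 cs.length = (List.range' 1 cs.length).map Nat.succ := by
      rw [List.range'_eq_map_range, List.range'_eq_map_range, List.map_map]
      apply List.map_congr_left
      intro k _
      simp [Nat.succ_eq_add_one]
      omega
    rw [hr, List.filter_map]
    have htail : ((List.range' 1 cs.length).filter
        ((fun i => decide ((c :: cs).getD (i - 1) ' ' ≠ ' ' ∧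
          (i = cs.length + 1 ∨ (c :: cs).getD i ' ' = ' '))) ∘ Nat.succ))
        = (List.range' 1 cs.length).filter
          (fun i => decide (cs.getD (i - 1) ' ' ≠ ' ' ∧ (i = cs.length ∨ cs.getD i ' ' = ' '))) := by
      apply List.filter_congr
      intro i hi
      have hi1 : 1 ≤ i := (List.mem_range'_1.1 hi).1
      simp only [Function.comp, decide_eq_decide]
      have hg : (c :: cs).getD (i + 1 - 1) ' ' = cs.getD (i - 1) ' ' := by
        rw [show i + 1 - 1 = (i - 1) + 1 by omega]; simp
      constructor
      · rintro ⟨h1, h2⟩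
        rw [hg] at h1
        refine ⟨h1, ?_⟩
        rcases h2 with h | h
        · left; omega
        · right; simpa using h
      · rintro ⟨h1, h2⟩
        rw [hg]
        refine ⟨h1, ?_⟩
        rcases h2 with h | h
        · left; omega
        · right; simpa using h
    rw [htail, ih]
    have hhead : (decide ((c :: cs).getD (1 - 1) ' ' ≠ ' ' ∧
        (1 = cs.length + 1 ∨ (c :: cs).getD 1 ' ' = ' ')))
        = decide (c ≠ ' ' ∧ (cs = [] ∨ cs.headD ' ' = ' ')) := by
      simp only [decide_eq_decide]
      cases cs with
      | nil => simp
      | cons d ds => simp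
    have he : eRecN (c :: cs)
        = (if c ≠ ' ' ∧ (cs = [] ∨ cs.headD ' ' = ' ') then [1] else []) ++ (eRecN cs).map (· + 1) := rfl
    rw [hhead, he]
    cases hd : decide (c ≠ ' ' ∧ (cs = [] ∨ cs.headD ' ' = ' ')) with
    | false =>
      have hp := of_decide_eq_false hd
      rw [if_neg hp]
      simp
    | true =>
      have hp := of_decide_eq_true hd
      rw [if_pos hp]
      simp

theorem bStarts_eq (l : List Char) : bStarts l = sI l 0 true := by
  rw [bStarts, sI, ← starts_filter_eq l true]
  have hpred : ∀ i ∈ List.range l.length,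
      (decide (l.getD i ' ' ≠ ' ' ∧ (i = 0 ∨ l.getD (i - 1) ' ' = ' ')))
        = decide (l.getD i ' ' ≠ ' ' ∧ (if i = 0 then true = true else l.getD (i - 1) ' ' = ' ')) := by
    intro i _
    simp only [decide_eq_decide]
    cases i with
    | zero => simp
    | succ j => simp
  rw [List.filter_congr hpred]
  apply List.map_congr_left
  intro k _
  simp

theorem bEnds_eq (l : List Char) : bEnds l = eI l 0 := by
  rw [bEnds, eI, ← ends_filter_eq l]
  apply List.map_congr_left
  intro k _
  simp

-- ---- tokenizer intermediate (proof-only): skip a word, loop with prev_end ----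
def skipWord : List Char → Int → List Char × Int
  | [], i => ([], i)
  | c :: cs, i => if c = ' ' then (c :: cs, i) else skipWord cs (i + 1)

theorem skipWord_len (cs : List Char) (i : Int) : (skipWord cs i).1.length ≤ cs.length := by
  induction cs generalizing i with
  | nil => simp [skipWord]
  | cons c cs ih =>
    simp only [skipWord]
    split
    · simp
    · exact le_trans (ih (i + 1)) (Nat.le_succ _)

def bLoop (min_spacing : Int) : List Char → Int → Option Int → List Int
  | [], _, _ => []
  | c :: cs, i, prev =>
    if c = ' ' then
      bLoop min_spacing cs (i + 1) prev
    else
      let r := skipWord cs (i + 1)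
      (if prev = none ∨ ∃ p, prev = some p ∧ i - p ≥ min_spacing then [i] else [])
        ++ bLoop min_spacing r.1 r.2 (some r.2)
termination_by cs => cs.length
decreasing_by
  · simp
  · exact Nat.lt_succ_of_le (skipWord_len cs (i + 1))

-- A = bLoop: one induction covering A's two post-first-word states.
theorem key (m : Int) (cs : List Char) :
    (∀ (i : Int) (lc : Int),
      aLoop m cs i (some lc) false 0
        = bLoop m (skipWord cs i).1 (skipWord cs i).2 (some (skipWord cs i).2)) ∧
    (∀ (i e sp : Int) (lc : Int), i = e + sp →
      aLoop m cs i (some lc) true sp = bLoop m cs i (some e)) := by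
  induction cs with
  | nil => simp [aLoop, bLoop, skipWord]
  | cons c cs ih =>
    constructor
    · intro i lc
      by_cases hc : c = ' '
      · subst hc
        simp only [aLoop, skipWord, bLoop, reduceIte, ne_eq, not_true_eq_false, and_false,
          if_false]
        simpa using ih.2 (i + 1) i 1 lc (by ring)
      · simp only [aLoop, skipWord, if_neg hc, ne_eq, Bool.false_eq_true, false_and, if_false]
        exact ih.1 (i + 1) lc
    · intro i e sp lc hie
      by_cases hc : c = ' '
      · subst hc
        simp only [aLoop, bLoop, reduceIte, ne_eq, not_true_eq_false, and_false, if_false]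
        exact ih.2 (i + 1) e (sp + 1) lc (by omega)
      · have h1 := ih.1 (i + 1) i
        simp [aLoop, bLoop, hc, h1]
        rw [show sp = i - e from by omega]

theorem lead (m : Int) (cs : List Char) :
    ∀ (i sp : Int), aLoop m cs i none true sp = bLoop m cs i none := by
  induction cs with
  | nil => simp [aLoop, bLoop]
  | cons c cs ih =>
    intro i sp
    by_cases hc : c = ' '
    · subst hc
      simp only [aLoop, bLoop, reduceIte, ne_eq, not_true_eq_false, and_false, if_false]
      exact ih (i + 1) (sp + 1)
    · simp only [aLoop, bLoop, ne_eq, hc, not_false_eq_true, and_true, true_or, if_true]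
      rw [(key m cs).1 (i + 1) i]
      simp

-- Word lemmas: the start/end lists of a suffix entered mid-word.
theorem W_s (cs : List Char) : ∀ (i : Int),
    sI cs i false = sI (skipWord cs i).1 (skipWord cs i).2 true := by
  induction cs with
  | nil => intro i; simp [skipWord, sI, sRecN]
  | cons c cs ih =>
    intro i
    by_cases hc : c = ' '
    · subst hc
      simp only [skipWord, reduceIte]
      rw [sI_cons, sI_cons]
      simp
    · simp only [skipWord, if_neg hc]
      rw [sI_cons]
      simp only [ne_eq, Bool.false_eq_true, and_false, if_false, List.nil_append]
      rw [show (c == ' ') = false from by simp [hc]]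
      exact ih (i + 1)

theorem W_e (cs : List Char) : ∀ (i : Int) (c : Char), c ≠ ' ' →
    eI (c :: cs) i = (skipWord cs (i + 1)).2 :: eI (skipWord cs (i + 1)).1 (skipWord cs (i + 1)).2 := by
  induction cs with
  | nil =>
    intro i c hc
    simp [skipWord, eI, eRecN, hc]
  | cons c' cs ih =>
    intro i c hc
    by_cases hc' : c' = ' '
    · subst hc'
      simp only [skipWord, reduceIte]
      rw [eI_cons]
      simp [hc]
    · simp only [skipWord, if_neg hc']
      rw [eI_cons]
      simp only [ne_eq, hc, not_false_eq_true, true_and]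
      rw [if_neg (by simp [hc'])]
      simpa using ih (i + 1) c' hc'

-- bLoop with a previous end e equals the zip-filter over (e :: ends) and starts.
theorem G2 (m : Int) : ∀ (n : Nat) (cs : List Char), cs.length ≤ n → ∀ (i e : Int),
    bLoop m cs i (some e) = zf m (e :: eI cs i) (sI cs i true) := by
  intro n
  induction n with
  | zero =>
    intro cs hn i e
    interval_cases h : cs.length
    · rw [List.length_eq_zero_iff.1 h]; simp [bLoop, sI, sRecN, zf]
  | succ n ih =>
    intro cs hn i e
    match cs with
    | [] => simp [bLoop, sI, sRecN, zf]
    | c :: cs' =>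
      by_cases hc : c = ' '
      · subst hc
        simp only [bLoop, reduceIte]
        rw [sI_cons, eI_cons]
        simp only [ne_eq, not_true_eq_false, false_and, if_false, List.nil_append]
        exact ih cs' (by simpa using hn) (i + 1) e
      · simp only [bLoop, if_neg hc]
        have hpe : (if (some e = (none : Option Int) ∨ ∃ p, some e = some p ∧ i - p ≥ m)
            then [i] else []) = if i - e ≥ m then [i] else [] := by simp
        rw [hpe, W_e cs' i c hc, sI_cons,
          if_pos (show c ≠ ' ' ∧ true = true from ⟨hc, rfl⟩), List.singleton_append,
          show (c == ' ') = false from by simp [hc], W_s cs' (i + 1), zf_cons]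
        have hlen : (skipWord cs' (i + 1)).1.length ≤ n :=
          le_trans (skipWord_len cs' (i + 1)) (by simpa using hn)
        rw [ih _ hlen (skipWord cs' (i + 1)).2 (skipWord cs' (i + 1)).2]

-- bLoop from the initial state equals B's combine of starts and ends.
theorem G1 (m : Int) : ∀ (cs : List Char) (i : Int),
    bLoop m cs i none = combine m (sI cs i true) (eI cs i) := by
  intro cs
  induction cs with
  | nil => intro i; simp [bLoop, sI, sRecN, combine]
  | cons c cs ih =>
    intro i
    by_cases hc : c = ' '
    · subst hc
      simp only [bLoop, reduceIte]
      rw [sI_cons, eI_cons]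
      simp only [ne_eq, not_true_eq_false, false_and, if_false, List.nil_append]
      exact ih (i + 1)
    · simp only [bLoop, if_neg hc]
      rw [if_pos (Or.inl trivial), W_e cs i c hc, sI_cons,
        if_pos (show c ≠ ' ' ∧ true = true from ⟨hc, rfl⟩), List.singleton_append,
        show (c == ' ') = false from by simp [hc], W_s cs (i + 1)]
      rw [G2 m (skipWord cs (i + 1)).1.length _ le_rfl]
      simp [combine]

-- ===== VERDICT (by name: the statement is the Claim_ definition above) =====
theorem iter_columns_from_line_spec : Claim_equal_iter_columns_from_line := by
  intro line m _
  unfold Spec_iter_columns_from_line iter_columns_from_line iter_columns_from_line_alt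
  rw [lead m line.toList 0 0, G1 m line.toList 0, bStarts_eq, bEnds_eq]
  rfl
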